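-- pv_equiv track=rewrite | github.com/ideaalab/gui-recorder | custom_components/gui_recorder/websocket_api.py | _normalize_excluded
-- ===== SOURCE A (Python) =====
-- def _normalize_entity_id(value: str) -> str:
--     return str(value).strip()
--
-- def _normalize_excluded(values) -> list[str]:
--     normalized: list[str] = []
--     seen: set[str] = set()
--     for value in values or []:
--         entity_id = _normalize_entity_id(value)
--         if not entity_id or entity_id in seen:
--             continue
--         seen.add(entity_id)
--         normalized.append(entity_id)
--     return sorted(normalized)
-- ===== SOURCE B (Python) =====
-- def _normalize_excluded(values) -> list[str]:
--     stripped = [str(v).strip() for v in (values or [])]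
--     nonempty = [s for s in stripped if s]
--     result: list[str] = []
--     for s in sorted(nonempty):
--         if not result or result[-1] != s:
--             result.append(s)
--     return result
-- ===== Notes on version B (the rewrite author's own statement) =====
-- stated objective: alternative
-- what changed: B strips all values first, filters out empties, sorts the whole list, and deduplicates by a single adjacency scan over the sorted list, instead of A's incremental seen-set dedup followed by a sort.
import Mathlib
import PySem

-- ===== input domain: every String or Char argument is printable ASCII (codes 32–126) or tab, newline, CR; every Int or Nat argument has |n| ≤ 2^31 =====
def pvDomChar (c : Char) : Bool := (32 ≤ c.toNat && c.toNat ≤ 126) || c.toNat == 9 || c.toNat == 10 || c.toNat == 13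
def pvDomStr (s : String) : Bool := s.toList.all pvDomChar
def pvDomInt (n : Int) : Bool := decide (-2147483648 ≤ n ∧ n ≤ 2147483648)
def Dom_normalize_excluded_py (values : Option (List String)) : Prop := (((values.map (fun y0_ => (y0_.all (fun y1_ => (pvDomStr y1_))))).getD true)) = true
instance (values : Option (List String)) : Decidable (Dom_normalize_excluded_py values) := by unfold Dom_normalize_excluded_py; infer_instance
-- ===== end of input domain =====

-- B reorganises the work as strip-all → filter empties → sort → adjacent-unique scan,
-- replacing A's incremental seen-set dedup followed by a sort (objective: alternative).

-- ===== PORT A =====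
-- the loop over `values or []` carrying (normalized, seen)
def pvALoop : List String → List String × PySem.Set String → List String × PySem.Set String
  | [], st => st
  | v :: rest, (normalized, seen) =>
    let entity_id := PySem.Str.strip v
    if entity_id = "" ∨ entity_id ∈ seen then
      pvALoop rest (normalized, seen)
    else
      pvALoop rest (normalized ++ [entity_id], PySem.Set.add seen entity_id)

def normalize_excluded_py (values : Option (List String)) : List String :=
  PySem.List.sorted (pvALoop (values.getD []) ([], PySem.Set.empty)).1 (fun x => x) false

-- ===== PORT B =====
def normalize_excluded_py_alt (values : Option (List String)) : List String :=
  let stripped := (values.getD []).map PySem.Str.strip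
  let nonempty := stripped.filter (fun s => s ≠ "")
  (PySem.List.sorted nonempty (fun x => x) false).foldl
    (fun result s => if result = [] ∨ result.getLast? ≠ some s then result ++ [s] else result) []

-- ===== PRECONDITION & SPEC =====
def Spec_normalize_excluded_py (values : Option (List String)) (out : List String) : Prop := out = normalize_excluded_py_alt values
instance (values : Option (List String)) (out : List String) : Decidable (Spec_normalize_excluded_py values out) := by unfold Spec_normalize_excluded_py; infer_instance

-- ===== CLAIM (what is proved, stated in full; the proofs are below) =====
def Claim_equal_normalize_excluded_py : Prop := ∀ (values : Option (List String)), Dom_normalize_excluded_py values → Spec_normalize_excluded_py values (normalize_excluded_py values)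

-- ===== LEMMAS AND PROOFS =====

-- A's loop, with seen = ofList normalized, is the set-fold over the stripped nonempty values
theorem pvALoop_eq_foldl (xs : List String) (acc : List String) :
    (pvALoop xs (acc, PySem.Set.ofList acc)).1
      = ((xs.map PySem.Str.strip).filter (fun s => s ≠ "")).foldl PySem.Set.add acc := by
  induction xs generalizing acc with
  | nil => simp [pvALoop]
  | cons v rest ih =>
    simp only [pvALoop, List.map_cons, List.filter_cons]
    by_cases he : PySem.Str.strip v = ""
    · simp [he, PySem.Set.mem_ofList, ih]
    · by_cases hm : PySem.Str.strip v ∈ acc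
      · simp [he, hm, PySem.Set.mem_ofList, ih]
      · have hnm : PySem.Str.strip v ∉ PySem.Set.ofList acc := by
          simpa [PySem.Set.mem_ofList] using hm
        have hof : (PySem.Set.ofList acc : List String) ++ [PySem.Str.strip v]
            = PySem.Set.ofList (acc ++ [PySem.Str.strip v]) :=
          ((PySem.Set.ofList_append_singleton acc (PySem.Str.strip v)).trans
            (PySem.Set.add_of_not_mem hnm)).symm
        rw [if_neg (by simp [he, PySem.Set.mem_ofList, hm]),
          PySem.Set.add_of_not_mem hnm, hof, ih, if_pos (by simp [he]),
          List.foldl_cons, PySem.Set.add_of_not_mem hm]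

-- B's adjacency-unique fold: membership
theorem pvUniq_mem (l res : List String) (x : String) :
    x ∈ l.foldl (fun result s => if result = [] ∨ result.getLast? ≠ some s then result ++ [s] else result) res
      ↔ x ∈ res ∨ x ∈ l := by
  induction l generalizing res with
  | nil => simp
  | cons s rest ih =>
    simp only [List.foldl_cons]
    by_cases h : res = [] ∨ res.getLast? ≠ some s
    · simp only [if_pos h, ih, List.mem_append, List.mem_cons]
      tauto
    · have hlast : res.getLast? = some s := not_not.mp (not_or.mp h).2
      have hs : s ∈ res := List.mem_of_getLast? hlast
      simp only [if_neg h, ih, List.mem_cons]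
      constructor
      · tauto
      · rintro (hx | rfl | hx) <;> tauto
    
-- B's adjacency-unique fold on a sorted input yields a strictly increasing list
theorem pvUniq_pairwise (l res : List String)
    (h1 : l.Pairwise (· ≤ ·)) (h2 : res.Pairwise (· < ·))
    (h3 : ∀ x ∈ res, ∀ y ∈ l, x ≤ y)
    (h4 : ∀ g, res.getLast? = some g → ∀ x ∈ res, x ≤ g) :
    (l.foldl (fun result s => if result = [] ∨ result.getLast? ≠ some s then result ++ [s] else result) res).Pairwise (· < ·) := by
  induction l generalizing res with
  | nil => simpa using h2
  | cons s rest ih =>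
    have hsle : ∀ y ∈ rest, s ≤ y := by
      intro y hy; exact (List.pairwise_cons.mp h1).1 y hy
    have h1' : rest.Pairwise (· ≤ ·) := (List.pairwise_cons.mp h1).2
    simp only [List.foldl_cons]
    by_cases h : res = [] ∨ res.getLast? ≠ some s
    · -- append s
      rw [if_pos h]
      refine ih (res ++ [s]) h1' ?_ ?_ ?_
      · rw [List.pairwise_append]
        refine ⟨h2, by simp, ?_⟩
        intro x hx y hy
        simp only [List.mem_singleton] at hy
        rw [hy]
        have hxle : x ≤ s := h3 x hx s (by simp)
        rcases lt_or_eq_of_le hxle with hlt | heq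
        · exact hlt
        · -- x = s ∈ res: then the last of res would be s, contradicting the branch test
          exfalso
          have hsmem : s ∈ res := heq ▸ hx
          have hres : res ≠ [] := List.ne_nil_of_mem hsmem
          obtain ⟨g, hg⟩ : ∃ g, res.getLast? = some g := by
            cases hgl : res.getLast? with
            | none => exact absurd (List.getLast?_eq_none_iff.mp hgl) hres
            | some g => exact ⟨g, rfl⟩
          have hgs : g ≤ s := h3 g (List.mem_of_getLast? hg) s (by simp)
          have hsg : s ≤ g := h4 g hg s hsmem
          rcases h with hnil | hne
          · exact hres hnil
          · exact hne (by rw [hg, le_antisymm hgs hsg])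
      · intro x hx y hy
        rcases List.mem_append.mp hx with hx' | hx'
        · exact h3 x hx' y (List.mem_cons_of_mem _ hy)
        · simp only [List.mem_singleton] at hx'; subst hx'
          exact hsle y hy
      · intro g hg x hx
        have hlastS : (res ++ [s]).getLast? = some s := by simp
        rw [hlastS] at hg
        have hgs : g = s := (Option.some_inj.mp hg).symm
        rw [hgs]
        rcases List.mem_append.mp hx with hx' | hx'
        · exact h3 x hx' s (by simp)
        · simp only [List.mem_singleton] at hx'; exact le_of_eq hx'
    · -- skip s (last of res is s already)
      rw [if_neg h]
      refine ih res h1' h2 ?_ h4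
      intro x hx y hy
      exact le_trans (h3 x hx s (by simp)) (hsle y hy)

-- ===== VERDICT (by name: the statement is the Claim_ definition above) =====
theorem normalize_excluded_py_spec : Claim_equal_normalize_excluded_py := by
  intro values _
  simp only [Spec_normalize_excluded_py, normalize_excluded_py, normalize_excluded_py_alt]
  have hA : (pvALoop (values.getD []) ([], PySem.Set.empty)).1
      = PySem.Set.ofList (((values.getD []).map PySem.Str.strip).filter (fun s => s ≠ "")) := by
    rw [PySem.Set.ofList_eq_foldl]
    exact pvALoop_eq_foldl (values.getD []) []
  rw [hA]
  have hpw :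
      ((PySem.List.sorted (((values.getD []).map PySem.Str.strip).filter (fun s => s ≠ ""))
          (fun x => x) false).foldl
        (fun result s => if result = [] ∨ result.getLast? ≠ some s then result ++ [s] else result)
        []).Pairwise (· < ·) := by
    refine pvUniq_pairwise _ [] ?_ (by simp) (by simp) (by simp)
    simpa using PySem.List.sorted_pairwise
      (((values.getD []).map PySem.Str.strip).filter (fun s => s ≠ "")) (fun x => x)
  have hmem : ∀ a : String,
      a ∈ ((PySem.List.sorted (((values.getD []).map PySem.Str.strip).filter (fun s => s ≠ ""))
          (fun x => x) false).foldl
        (fun result s => if result = [] ∨ result.getLast? ≠ some s then result ++ [s] else result) [])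
      ↔ a ∈ PySem.Set.ofList (((values.getD []).map PySem.Str.strip).filter (fun s => s ≠ "")) := by
    intro a
    rw [pvUniq_mem]
    simp [PySem.Set.mem_ofList, PySem.List.mem_sorted]
  have hperm := (List.perm_ext_iff_of_nodup
      (hpw.imp fun h => ne_of_lt h)
      (PySem.Set.nodup_ofList (((values.getD []).map PySem.Str.strip).filter (fun s => s ≠ "")))).mpr hmem
  exact PySem.List.sorted_eq_of_perm_of_pairwise_lt _ _ _ hperm hpw
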